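-- pv_equiv track=rewrite | github.com/bhanuprakashd/sl_agents | aass_agents/tools/cross_agent_learning.py | _get_sibling_agents
-- ===== SOURCE A (Python) =====
-- from typing import Optional
--
-- DEPARTMENT_MAP = {
--     "sales": [
--         "lead_researcher_agent", "outreach_composer_agent", "sales_call_prep_agent",
--         "objection_handler_agent", "proposal_generator_agent", "crm_updater_agent",
--         "deal_analyst_agent",
--     ],
--     "marketing": [
--         "audience_builder_agent", "campaign_composer_agent", "content_strategist_agent",
--         "seo_analyst_agent", "campaign_analyst_agent", "brand_voice_agent",
--     ],
--     "product": [
--         "pm_agent", "architect_agent", "backend_builder_agent",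
--         "frontend_builder_agent", "qa_agent", "db_agent", "devops_agent",
--         "builder_agent", "setup_agent", "ship_agent",
--     ],
--     "engineering": [
--         "data_engineer_agent", "ml_engineer_agent", "platform_engineer_agent",
--         "solutions_architect_agent", "systems_engineer_agent",
--         "integration_engineer_agent", "sdet_agent",
--     ],
--     "research": [
--         "research_scientist_agent", "data_scientist_agent", "ml_researcher_agent",
--         "competitive_analyst_agent", "user_researcher_agent",
--         "applied_scientist_agent", "knowledge_manager_agent",
--     ],
--     "qa": [
--         "qa_engineer_agent", "test_architect_agent", "test_automation_engineer_agent",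
--         "performance_engineer_agent", "security_tester_agent", "chaos_engineer_agent",
--     ],
-- }
--
-- ROLE_GROUPS = {
--     "orchestrator": [
--         "company_orchestrator_agent", "product_orchestrator_agent",
--         "engineering_orchestrator_agent", "marketing_orchestrator_agent",
--         "sales_orchestrator_agent", "research_orchestrator_agent",
--         "qa_orchestrator_agent",
--     ],
--     "analyst": [
--         "deal_analyst_agent", "campaign_analyst_agent", "competitive_analyst_agent",
--         "seo_analyst_agent", "data_scientist_agent",
--     ],
--     "builder": [
--         "backend_builder_agent", "frontend_builder_agent", "builder_agent",
--         "data_engineer_agent", "ml_engineer_agent",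
--     ],
--     "researcher": [
--         "lead_researcher_agent", "research_scientist_agent", "user_researcher_agent",
--         "applied_scientist_agent", "ml_researcher_agent",
--     ],
-- }
--
-- def _get_department(agent_name: str) -> Optional[str]:
--     """Find which department an agent belongs to."""
--     for dept, agents in DEPARTMENT_MAP.items():
--         if agent_name in agents:
--             return dept
--     return None
--
-- def _get_role_group(agent_name: str) -> Optional[str]:
--     """Find which role group an agent belongs to."""
--     for role, agents in ROLE_GROUPS.items():
--         if agent_name in agents:
--             return role
--     return None
--
-- def _get_sibling_agents(agent_name: str) -> list[str]:
--     """Get related agents: same department + same role group across departments."""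
--     siblings = set()
--
--     dept = _get_department(agent_name)
--     if dept:
--         for a in DEPARTMENT_MAP[dept]:
--             if a != agent_name:
--                 siblings.add(a)
--
--     role = _get_role_group(agent_name)
--     if role:
--         for a in ROLE_GROUPS[role]:
--             if a != agent_name:
--                 siblings.add(a)
--
--     return sorted(siblings)
-- ===== SOURCE B (Python) =====
-- from typing import Optional
--
-- DEPARTMENT_MAP = {
--     "sales": [
--         "lead_researcher_agent", "outreach_composer_agent", "sales_call_prep_agent",
--         "objection_handler_agent", "proposal_generator_agent", "crm_updater_agent",
--         "deal_analyst_agent",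
--     ],
--     "marketing": [
--         "audience_builder_agent", "campaign_composer_agent", "content_strategist_agent",
--         "seo_analyst_agent", "campaign_analyst_agent", "brand_voice_agent",
--     ],
--     "product": [
--         "pm_agent", "architect_agent", "backend_builder_agent",
--         "frontend_builder_agent", "qa_agent", "db_agent", "devops_agent",
--         "builder_agent", "setup_agent", "ship_agent",
--     ],
--     "engineering": [
--         "data_engineer_agent", "ml_engineer_agent", "platform_engineer_agent",
--         "solutions_architect_agent", "systems_engineer_agent",
--         "integration_engineer_agent", "sdet_agent",
--     ],
--     "research": [
--         "research_scientist_agent", "data_scientist_agent", "ml_researcher_agent",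
--         "competitive_analyst_agent", "user_researcher_agent",
--         "applied_scientist_agent", "knowledge_manager_agent",
--     ],
--     "qa": [
--         "qa_engineer_agent", "test_architect_agent", "test_automation_engineer_agent",
--         "performance_engineer_agent", "security_tester_agent", "chaos_engineer_agent",
--     ],
-- }
--
-- ROLE_GROUPS = {
--     "orchestrator": [
--         "company_orchestrator_agent", "product_orchestrator_agent",
--         "engineering_orchestrator_agent", "marketing_orchestrator_agent",
--         "sales_orchestrator_agent", "research_orchestrator_agent",
--         "qa_orchestrator_agent",
--     ],
--     "analyst": [
--         "deal_analyst_agent", "campaign_analyst_agent", "competitive_analyst_agent",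
--         "seo_analyst_agent", "data_scientist_agent",
--     ],
--     "builder": [
--         "backend_builder_agent", "frontend_builder_agent", "builder_agent",
--         "data_engineer_agent", "ml_engineer_agent",
--     ],
--     "researcher": [
--         "lead_researcher_agent", "research_scientist_agent", "user_researcher_agent",
--         "applied_scientist_agent", "ml_researcher_agent",
--     ],
-- }
--
--
-- def _build_sibling_table() -> dict[str, list[str]]:
--     """Build, once, a map from every agent to its sorted list of siblings."""
--     table: dict[str, set[str]] = {}
--     for groups in (DEPARTMENT_MAP, ROLE_GROUPS):
--         for members in groups.values():
--             for m in members: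
--                 s = table.get(m, set())
--                 for other in members:
--                     if other != m:
--                         s.add(other)
--                 table[m] = s
--     return {name: sorted(sibs) for name, sibs in table.items()}
--
--
-- _SIBLING_TABLE = _build_sibling_table()
--
--
-- def _get_sibling_agents(agent_name: str) -> list[str]:
--     """Get related agents: same department + same role group across departments."""
--     return list(_SIBLING_TABLE.get(agent_name, []))
-- ===== Notes on version B (the rewrite author's own statement) =====
-- stated objective: alternative
-- what changed: B precomputes once, at module load, a reverse table mapping every agent to its full sorted sibling list (one pass over both group maps, unioning co-members per agent), so each call is a single dict lookup instead of A's per-call scans of DEPARTMENT_MAP and ROLE_GROUPS plus set-building and sorting.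
import Mathlib
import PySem

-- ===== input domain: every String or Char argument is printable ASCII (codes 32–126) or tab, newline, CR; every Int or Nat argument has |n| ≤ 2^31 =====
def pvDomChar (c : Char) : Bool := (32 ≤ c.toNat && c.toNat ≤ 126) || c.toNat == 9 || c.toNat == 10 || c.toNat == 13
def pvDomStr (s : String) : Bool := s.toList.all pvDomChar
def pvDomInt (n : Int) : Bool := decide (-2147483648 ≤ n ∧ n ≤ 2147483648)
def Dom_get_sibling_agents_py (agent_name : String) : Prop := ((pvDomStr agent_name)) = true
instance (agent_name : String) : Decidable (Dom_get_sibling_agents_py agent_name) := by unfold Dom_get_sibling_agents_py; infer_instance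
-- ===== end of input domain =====

set_option maxRecDepth 100000
set_option maxHeartbeats 4000000

-- ===== PORT A =====
-- B precomputes one agent -> sorted-siblings table at module load, replacing A's per-call
-- scans of both group maps with a single dictionary lookup (objective: alternative).

-- shared module-level constants (the dict literals DEPARTMENT_MAP / ROLE_GROUPS)
def departmentMap : PySem.Dict String (List String) := PySem.Dict.ofList [
    ("sales", ["lead_researcher_agent", "outreach_composer_agent", "sales_call_prep_agent", "objection_handler_agent", "proposal_generator_agent", "crm_updater_agent", "deal_analyst_agent"]),
    ("marketing", ["audience_builder_agent", "campaign_composer_agent", "content_strategist_agent", "seo_analyst_agent", "campaign_analyst_agent", "brand_voice_agent"]),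
    ("product", ["pm_agent", "architect_agent", "backend_builder_agent", "frontend_builder_agent", "qa_agent", "db_agent", "devops_agent", "builder_agent", "setup_agent", "ship_agent"]),
    ("engineering", ["data_engineer_agent", "ml_engineer_agent", "platform_engineer_agent", "solutions_architect_agent", "systems_engineer_agent", "integration_engineer_agent", "sdet_agent"]),
    ("research", ["research_scientist_agent", "data_scientist_agent", "ml_researcher_agent", "competitive_analyst_agent", "user_researcher_agent", "applied_scientist_agent", "knowledge_manager_agent"]),
    ("qa", ["qa_engineer_agent", "test_architect_agent", "test_automation_engineer_agent", "performance_engineer_agent", "security_tester_agent", "chaos_engineer_agent"])]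

def roleGroups : PySem.Dict String (List String) := PySem.Dict.ofList [
    ("orchestrator", ["company_orchestrator_agent", "product_orchestrator_agent", "engineering_orchestrator_agent", "marketing_orchestrator_agent", "sales_orchestrator_agent", "research_orchestrator_agent", "qa_orchestrator_agent"]),
    ("analyst", ["deal_analyst_agent", "campaign_analyst_agent", "competitive_analyst_agent", "seo_analyst_agent", "data_scientist_agent"]),
    ("builder", ["backend_builder_agent", "frontend_builder_agent", "builder_agent", "data_engineer_agent", "ml_engineer_agent"]),
    ("researcher", ["lead_researcher_agent", "research_scientist_agent", "user_researcher_agent", "applied_scientist_agent", "ml_researcher_agent"])]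

-- the shared body of _get_department / _get_role_group: a for-loop over d.items()
-- returning the first group whose member list contains agent_name
def findGroup_py (items : List (String × List String)) (agent_name : String) : Option String :=
  match items with
  | [] => none
  | (g, agents) :: rest =>
      if agent_name ∈ agents then some g else findGroup_py rest agent_name

def get_department_py (agent_name : String) : Option String :=
  findGroup_py departmentMap.items agent_name

def get_role_group_py (agent_name : String) : Option String :=
  findGroup_py roleGroups.items agent_name

def get_sibling_agents_py (agent_name : String) : List String :=
  let siblings : PySem.Set String := PySem.Set.empty
  -- 'if dept:' — Python truthiness on Optional[str]: not None and not ""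
  let siblings :=
    match get_department_py agent_name with
    | some dept =>
        if dept ≠ "" then
          -- DEPARTMENT_MAP[dept]: dept is always a key here, so getD is exact (no KeyError path reachable)
          (departmentMap.getD dept []).foldl
            (fun s a => if a ≠ agent_name then PySem.Set.add s a else s) siblings
        else siblings
    | none => siblings
  let siblings :=
    match get_role_group_py agent_name with
    | some role =>
        if role ≠ "" then
          (roleGroups.getD role []).foldl
            (fun s a => if a ≠ agent_name then PySem.Set.add s a else s) siblings
        else siblings
    | none => siblings
  -- sorted(siblings): Python's str order is code-point lexicographic = '<' on .toList (PYSEM str COMPARISON)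
  PySem.List.sorted siblings (fun x => x.toList) false

-- ===== PORT B =====
-- _build_sibling_table: one pass over both group maps unioning each member's co-members,
-- then sort each sibling set once
def siblingTable : PySem.Dict String (List String) :=
  let table : PySem.Dict String (PySem.Set String) :=
    [departmentMap, roleGroups].foldl (fun table groups =>
      groups.values.foldl (fun table members =>
        members.foldl (fun table m =>
          let s := table.getD m PySem.Set.empty
          let s := members.foldl
            (fun s other => if other ≠ m then PySem.Set.add s other else s) s
          table.insert m s) table) table) PySem.Dict.empty
  PySem.Dict.ofList (table.items.map (fun p => (p.1, PySem.List.sorted p.2 (fun x => x.toList) false)))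

def get_sibling_agents_py_alt (agent_name : String) : List String :=
  -- _SIBLING_TABLE.get(agent_name, []) (list(...) copies; identity on values)
  siblingTable.getD agent_name []

-- ===== PRECONDITION & SPEC =====
def Spec_get_sibling_agents_py (agent_name : String) (out : List String) : Prop := out = get_sibling_agents_py_alt agent_name
instance (agent_name : String) (out : List String) : Decidable (Spec_get_sibling_agents_py agent_name out) := by unfold Spec_get_sibling_agents_py; infer_instance

-- ===== CLAIM (what is proved, stated in full; the proofs are below) =====
def Claim_equal_get_sibling_agents_py : Prop := ∀ (agent_name : String), Dom_get_sibling_agents_py agent_name → Spec_get_sibling_agents_py agent_name (get_sibling_agents_py agent_name)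

-- ===== LEMMAS AND PROOFS =====

-- every agent name occurring in either group map (proof-only)
def allAgentNames : List String := [
    "lead_researcher_agent",
    "outreach_composer_agent",
    "sales_call_prep_agent",
    "objection_handler_agent",
    "proposal_generator_agent",
    "crm_updater_agent",
    "deal_analyst_agent",
    "audience_builder_agent",
    "campaign_composer_agent",
    "content_strategist_agent",
    "seo_analyst_agent",
    "campaign_analyst_agent",
    "brand_voice_agent",
    "pm_agent",
    "architect_agent",
    "backend_builder_agent",
    "frontend_builder_agent",
    "qa_agent",
    "db_agent",
    "devops_agent",
    "builder_agent",
    "setup_agent",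
    "ship_agent",
    "data_engineer_agent",
    "ml_engineer_agent",
    "platform_engineer_agent",
    "solutions_architect_agent",
    "systems_engineer_agent",
    "integration_engineer_agent",
    "sdet_agent",
    "research_scientist_agent",
    "data_scientist_agent",
    "ml_researcher_agent",
    "competitive_analyst_agent",
    "user_researcher_agent",
    "applied_scientist_agent",
    "knowledge_manager_agent",
    "qa_engineer_agent",
    "test_architect_agent",
    "test_automation_engineer_agent",
    "performance_engineer_agent",
    "security_tester_agent",
    "chaos_engineer_agent",
    "company_orchestrator_agent",
    "product_orchestrator_agent",
    "engineering_orchestrator_agent",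
    "marketing_orchestrator_agent",
    "sales_orchestrator_agent",
    "research_orchestrator_agent",
    "qa_orchestrator_agent"]

-- B's table, evaluated once to a literal so the 50 per-name cases need not rebuild it
def siblingTableLit : List (String × List String) := [
    ("lead_researcher_agent", ["applied_scientist_agent", "crm_updater_agent", "deal_analyst_agent", "ml_researcher_agent", "objection_handler_agent", "outreach_composer_agent", "proposal_generator_agent", "research_scientist_agent", "sales_call_prep_agent", "user_researcher_agent"]),
    ("outreach_composer_agent", ["crm_updater_agent", "deal_analyst_agent", "lead_researcher_agent", "objection_handler_agent", "proposal_generator_agent", "sales_call_prep_agent"]),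
    ("sales_call_prep_agent", ["crm_updater_agent", "deal_analyst_agent", "lead_researcher_agent", "objection_handler_agent", "outreach_composer_agent", "proposal_generator_agent"]),
    ("objection_handler_agent", ["crm_updater_agent", "deal_analyst_agent", "lead_researcher_agent", "outreach_composer_agent", "proposal_generator_agent", "sales_call_prep_agent"]),
    ("proposal_generator_agent", ["crm_updater_agent", "deal_analyst_agent", "lead_researcher_agent", "objection_handler_agent", "outreach_composer_agent", "sales_call_prep_agent"]),
    ("crm_updater_agent", ["deal_analyst_agent", "lead_researcher_agent", "objection_handler_agent", "outreach_composer_agent", "proposal_generator_agent", "sales_call_prep_agent"]),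
    ("deal_analyst_agent", ["campaign_analyst_agent", "competitive_analyst_agent", "crm_updater_agent", "data_scientist_agent", "lead_researcher_agent", "objection_handler_agent", "outreach_composer_agent", "proposal_generator_agent", "sales_call_prep_agent", "seo_analyst_agent"]),
    ("audience_builder_agent", ["brand_voice_agent", "campaign_analyst_agent", "campaign_composer_agent", "content_strategist_agent", "seo_analyst_agent"]),
    ("campaign_composer_agent", ["audience_builder_agent", "brand_voice_agent", "campaign_analyst_agent", "content_strategist_agent", "seo_analyst_agent"]),
    ("content_strategist_agent", ["audience_builder_agent", "brand_voice_agent", "campaign_analyst_agent", "campaign_composer_agent", "seo_analyst_agent"]),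
    ("seo_analyst_agent", ["audience_builder_agent", "brand_voice_agent", "campaign_analyst_agent", "campaign_composer_agent", "competitive_analyst_agent", "content_strategist_agent", "data_scientist_agent", "deal_analyst_agent"]),
    ("campaign_analyst_agent", ["audience_builder_agent", "brand_voice_agent", "campaign_composer_agent", "competitive_analyst_agent", "content_strategist_agent", "data_scientist_agent", "deal_analyst_agent", "seo_analyst_agent"]),
    ("brand_voice_agent", ["audience_builder_agent", "campaign_analyst_agent", "campaign_composer_agent", "content_strategist_agent", "seo_analyst_agent"]),
    ("pm_agent", ["architect_agent", "backend_builder_agent", "builder_agent", "db_agent", "devops_agent", "frontend_builder_agent", "qa_agent", "setup_agent", "ship_agent"]),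
    ("architect_agent", ["backend_builder_agent", "builder_agent", "db_agent", "devops_agent", "frontend_builder_agent", "pm_agent", "qa_agent", "setup_agent", "ship_agent"]),
    ("backend_builder_agent", ["architect_agent", "builder_agent", "data_engineer_agent", "db_agent", "devops_agent", "frontend_builder_agent", "ml_engineer_agent", "pm_agent", "qa_agent", "setup_agent", "ship_agent"]),
    ("frontend_builder_agent", ["architect_agent", "backend_builder_agent", "builder_agent", "data_engineer_agent", "db_agent", "devops_agent", "ml_engineer_agent", "pm_agent", "qa_agent", "setup_agent", "ship_agent"]),
    ("qa_agent", ["architect_agent", "backend_builder_agent", "builder_agent", "db_agent", "devops_agent", "frontend_builder_agent", "pm_agent", "setup_agent", "ship_agent"]),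
    ("db_agent", ["architect_agent", "backend_builder_agent", "builder_agent", "devops_agent", "frontend_builder_agent", "pm_agent", "qa_agent", "setup_agent", "ship_agent"]),
    ("devops_agent", ["architect_agent", "backend_builder_agent", "builder_agent", "db_agent", "frontend_builder_agent", "pm_agent", "qa_agent", "setup_agent", "ship_agent"]),
    ("builder_agent", ["architect_agent", "backend_builder_agent", "data_engineer_agent", "db_agent", "devops_agent", "frontend_builder_agent", "ml_engineer_agent", "pm_agent", "qa_agent", "setup_agent", "ship_agent"]),
    ("setup_agent", ["architect_agent", "backend_builder_agent", "builder_agent", "db_agent", "devops_agent", "frontend_builder_agent", "pm_agent", "qa_agent", "ship_agent"]),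
    ("ship_agent", ["architect_agent", "backend_builder_agent", "builder_agent", "db_agent", "devops_agent", "frontend_builder_agent", "pm_agent", "qa_agent", "setup_agent"]),
    ("data_engineer_agent", ["backend_builder_agent", "builder_agent", "frontend_builder_agent", "integration_engineer_agent", "ml_engineer_agent", "platform_engineer_agent", "sdet_agent", "solutions_architect_agent", "systems_engineer_agent"]),
    ("ml_engineer_agent", ["backend_builder_agent", "builder_agent", "data_engineer_agent", "frontend_builder_agent", "integration_engineer_agent", "platform_engineer_agent", "sdet_agent", "solutions_architect_agent", "systems_engineer_agent"]),
    ("platform_engineer_agent", ["data_engineer_agent", "integration_engineer_agent", "ml_engineer_agent", "sdet_agent", "solutions_architect_agent", "systems_engineer_agent"]),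
    ("solutions_architect_agent", ["data_engineer_agent", "integration_engineer_agent", "ml_engineer_agent", "platform_engineer_agent", "sdet_agent", "systems_engineer_agent"]),
    ("systems_engineer_agent", ["data_engineer_agent", "integration_engineer_agent", "ml_engineer_agent", "platform_engineer_agent", "sdet_agent", "solutions_architect_agent"]),
    ("integration_engineer_agent", ["data_engineer_agent", "ml_engineer_agent", "platform_engineer_agent", "sdet_agent", "solutions_architect_agent", "systems_engineer_agent"]),
    ("sdet_agent", ["data_engineer_agent", "integration_engineer_agent", "ml_engineer_agent", "platform_engineer_agent", "solutions_architect_agent", "systems_engineer_agent"]),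
    ("research_scientist_agent", ["applied_scientist_agent", "competitive_analyst_agent", "data_scientist_agent", "knowledge_manager_agent", "lead_researcher_agent", "ml_researcher_agent", "user_researcher_agent"]),
    ("data_scientist_agent", ["applied_scientist_agent", "campaign_analyst_agent", "competitive_analyst_agent", "deal_analyst_agent", "knowledge_manager_agent", "ml_researcher_agent", "research_scientist_agent", "seo_analyst_agent", "user_researcher_agent"]),
    ("ml_researcher_agent", ["applied_scientist_agent", "competitive_analyst_agent", "data_scientist_agent", "knowledge_manager_agent", "lead_researcher_agent", "research_scientist_agent", "user_researcher_agent"]),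
    ("competitive_analyst_agent", ["applied_scientist_agent", "campaign_analyst_agent", "data_scientist_agent", "deal_analyst_agent", "knowledge_manager_agent", "ml_researcher_agent", "research_scientist_agent", "seo_analyst_agent", "user_researcher_agent"]),
    ("user_researcher_agent", ["applied_scientist_agent", "competitive_analyst_agent", "data_scientist_agent", "knowledge_manager_agent", "lead_researcher_agent", "ml_researcher_agent", "research_scientist_agent"]),
    ("applied_scientist_agent", ["competitive_analyst_agent", "data_scientist_agent", "knowledge_manager_agent", "lead_researcher_agent", "ml_researcher_agent", "research_scientist_agent", "user_researcher_agent"]),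
    ("knowledge_manager_agent", ["applied_scientist_agent", "competitive_analyst_agent", "data_scientist_agent", "ml_researcher_agent", "research_scientist_agent", "user_researcher_agent"]),
    ("qa_engineer_agent", ["chaos_engineer_agent", "performance_engineer_agent", "security_tester_agent", "test_architect_agent", "test_automation_engineer_agent"]),
    ("test_architect_agent", ["chaos_engineer_agent", "performance_engineer_agent", "qa_engineer_agent", "security_tester_agent", "test_automation_engineer_agent"]),
    ("test_automation_engineer_agent", ["chaos_engineer_agent", "performance_engineer_agent", "qa_engineer_agent", "security_tester_agent", "test_architect_agent"]),
    ("performance_engineer_agent", ["chaos_engineer_agent", "qa_engineer_agent", "security_tester_agent", "test_architect_agent", "test_automation_engineer_agent"]),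
    ("security_tester_agent", ["chaos_engineer_agent", "performance_engineer_agent", "qa_engineer_agent", "test_architect_agent", "test_automation_engineer_agent"]),
    ("chaos_engineer_agent", ["performance_engineer_agent", "qa_engineer_agent", "security_tester_agent", "test_architect_agent", "test_automation_engineer_agent"]),
    ("company_orchestrator_agent", ["engineering_orchestrator_agent", "marketing_orchestrator_agent", "product_orchestrator_agent", "qa_orchestrator_agent", "research_orchestrator_agent", "sales_orchestrator_agent"]),
    ("product_orchestrator_agent", ["company_orchestrator_agent", "engineering_orchestrator_agent", "marketing_orchestrator_agent", "qa_orchestrator_agent", "research_orchestrator_agent", "sales_orchestrator_agent"]),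
    ("engineering_orchestrator_agent", ["company_orchestrator_agent", "marketing_orchestrator_agent", "product_orchestrator_agent", "qa_orchestrator_agent", "research_orchestrator_agent", "sales_orchestrator_agent"]),
    ("marketing_orchestrator_agent", ["company_orchestrator_agent", "engineering_orchestrator_agent", "product_orchestrator_agent", "qa_orchestrator_agent", "research_orchestrator_agent", "sales_orchestrator_agent"]),
    ("sales_orchestrator_agent", ["company_orchestrator_agent", "engineering_orchestrator_agent", "marketing_orchestrator_agent", "product_orchestrator_agent", "qa_orchestrator_agent", "research_orchestrator_agent"]),
    ("research_orchestrator_agent", ["company_orchestrator_agent", "engineering_orchestrator_agent", "marketing_orchestrator_agent", "product_orchestrator_agent", "qa_orchestrator_agent", "sales_orchestrator_agent"]),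
    ("qa_orchestrator_agent", ["company_orchestrator_agent", "engineering_orchestrator_agent", "marketing_orchestrator_agent", "product_orchestrator_agent", "research_orchestrator_agent", "sales_orchestrator_agent"])]

theorem siblingTable_eq : siblingTable = PySem.Dict.ofList siblingTableLit := by rfl

theorem alt_lookup (agent_name : String) :
    get_sibling_agents_py_alt agent_name = (PySem.Dict.ofList siblingTableLit).getD agent_name [] := by
  unfold get_sibling_agents_py_alt
  rw [siblingTable_eq]

theorem findGroup_eq_none (items : List (String × List String)) (agent_name : String)
    (h : ∀ p ∈ items, agent_name ∉ p.2) : findGroup_py items agent_name = none := by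
  induction items with
  | nil => rfl
  | cons p rest ih =>
      obtain ⟨g, agents⟩ := p
      simp only [findGroup_py]
      rw [if_neg (h _ (List.mem_cons_self))]
      exact ih (fun q hq => h q (List.mem_cons_of_mem _ hq))

theorem unknown_case (agent_name : String) (h : agent_name ∉ allAgentNames) :
    get_sibling_agents_py agent_name = get_sibling_agents_py_alt agent_name := by
  have coverD : ∀ p ∈ departmentMap.items, ∀ x ∈ p.2, x ∈ allAgentNames := by decide
  have coverR : ∀ p ∈ roleGroups.items, ∀ x ∈ p.2, x ∈ allAgentNames := by decide
  have coverK : ∀ x ∈ (PySem.Dict.ofList siblingTableLit).keys, x ∈ allAgentNames := by decide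
  have hd : get_department_py agent_name = none :=
    findGroup_eq_none _ _ (fun p hp hm => h (coverD p hp _ hm))
  have hr : get_role_group_py agent_name = none :=
    findGroup_eq_none _ _ (fun p hp hm => h (coverR p hp _ hm))
  have hb : get_sibling_agents_py_alt agent_name = [] := by
    rw [alt_lookup]
    apply PySem.Dict.getD_of_not_contains
    rw [PySem.Dict.contains_eq_decide_mem_keys]
    exact decide_eq_false (fun hm => h (coverK _ hm))
  rw [hb]
  unfold get_sibling_agents_py
  rw [hd, hr]
  rfl

-- ===== VERDICT (by name: the statement is the Claim_ definition above) =====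
theorem get_sibling_agents_py_spec : Claim_equal_get_sibling_agents_py := by
  intro agent_name _
  unfold Spec_get_sibling_agents_py
  by_cases h : agent_name ∈ allAgentNames
  · fin_cases h <;> rw [alt_lookup] <;> rfl
  · exact unknown_case agent_name h
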